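-- pv_equiv track=rewrite | github.com/qiyuanhuadelaide/Python_Code | hw3.py | neighbor_sum
-- ===== SOURCE A (Python) =====
-- def neighbor_sum(a_list):
--     n = len(a_list)
--     # create a new list where the neighbors of each element are added to it
--     b_list = [0 for i in range(n)]
--     for i in range(0, n):
--         # when there's number on the leftside
--         if i - 1 >= 0:
--             b_list[i] += a_list[i - 1]
--         # when there's number on the rightside
--         if i + 1 < n:
--             b_list[i] += a_list[i + 1]
--         # add itself all the time
--         b_list[i] += a_list[i]
--     return b_list
-- ===== SOURCE B (Python) =====
-- def neighbor_sum(a_list):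
--     a_list = list(a_list)
--     left = [0] + a_list[:-1]
--     right = a_list[1:] + [0]
--     return [l + c + r for l, c, r in zip(left, a_list, right)]
-- ===== Notes on version B (the rewrite author's own statement) =====
-- stated objective: faster
-- what changed: Replaces the per-index loop with conditional branches and in-place accumulation into a zero-initialized list by a single zip pass over three zero-padded shifted views ([0]+a[:-1], a, a[1:]+[0]), so the boundaries are handled by padding instead of per-element tests and indexed writes.
import Mathlib
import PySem

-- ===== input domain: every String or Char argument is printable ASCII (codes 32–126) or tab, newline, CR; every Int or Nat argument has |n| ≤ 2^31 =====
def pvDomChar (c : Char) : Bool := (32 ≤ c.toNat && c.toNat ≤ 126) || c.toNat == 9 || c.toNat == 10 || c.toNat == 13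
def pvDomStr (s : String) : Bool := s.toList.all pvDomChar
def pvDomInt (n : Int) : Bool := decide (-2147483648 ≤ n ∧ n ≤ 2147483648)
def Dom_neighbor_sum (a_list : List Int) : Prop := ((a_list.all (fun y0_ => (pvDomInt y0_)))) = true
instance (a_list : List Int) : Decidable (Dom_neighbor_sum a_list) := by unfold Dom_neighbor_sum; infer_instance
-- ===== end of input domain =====

-- B computes the neighbor sums by element-wise addition of three zero-padded shifted views
-- (zip of [0]+a[:-1], a, a[1:]+[0]) instead of A's conditional accumulation into a zero list.


-- ===== PORT A =====
-- loop body of A's for-loop: the two neighbor conditionals, then adding the element itself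
def nsStep (a_list : List Int) (b : List Int) (i : Int) : List Int :=
  let n : Int := a_list.length
  let b1 := if 0 ≤ i - 1 then
      PySem.List.pySetD b i (PySem.List.pyGetD b i 0 + PySem.List.pyGetD a_list (i - 1) 0)
    else b
  let b2 := if i + 1 < n then
      PySem.List.pySetD b1 i (PySem.List.pyGetD b1 i 0 + PySem.List.pyGetD a_list (i + 1) 0)
    else b1
  PySem.List.pySetD b2 i (PySem.List.pyGetD b2 i 0 + PySem.List.pyGetD a_list i 0)

def neighbor_sum (a_list : List Int) : List Int :=
  let n : Int := a_list.length
  let b_list := (PySem.List.pyRange 0 n 1).map (fun _ => (0 : Int))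
  (PySem.List.pyRange 0 n 1).foldl (nsStep a_list) b_list

-- ===== PORT B =====
def neighbor_sum_alt (a_list : List Int) : List Int :=
  let left := 0 :: PySem.List.slice a_list none (some (-1))
  let right := PySem.List.slice a_list (some 1) none ++ [0]
  (left.zip (a_list.zip right)).map (fun p => p.1 + p.2.1 + p.2.2)

-- ===== PRECONDITION & SPEC =====
def Spec_neighbor_sum (a_list : List Int) (out : List Int) : Prop := out = neighbor_sum_alt a_list
instance (a_list : List Int) (out : List Int) : Decidable (Spec_neighbor_sum a_list out) := by unfold Spec_neighbor_sum; infer_instance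

-- ===== CLAIM (what is proved, stated in full; the proofs are below) =====
def Claim_equal_neighbor_sum : Prop := ∀ (a_list : List Int), Dom_neighbor_sum a_list → Spec_neighbor_sum a_list (neighbor_sum a_list)

-- ===== LEMMAS AND PROOFS =====

-- the value both programs produce at index j
def nsVal (a : List Int) (j : Nat) : Int :=
  (if 1 ≤ j then a.getD (j - 1) 0 else 0)
    + (if j + 1 < a.length then a.getD (j + 1) 0 else 0)
    + a.getD j 0

theorem set_map_range (a : List Int) (f : Nat → Int) (k : Nat) (v : Int) :
    ((List.range a.length).map f).set k v
      = (List.range a.length).map (fun j => if j = k then v else f j) := by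
  apply List.ext_getElem
  · simp
  · intro j h1 h2
    rw [List.getElem_set]
    simp only [List.getElem_map, List.getElem_range]
    by_cases h : j = k
    · simp [h]
    · simp [h, Ne.symm h]

theorem step_final (a : List Int) (k : Nat) (v : Int)
    (hv : v = nsVal a k) :
    ((List.range a.length).map (fun j => if j < k then nsVal a j else 0)).set k v
      = (List.range a.length).map (fun j => if j < k + 1 then nsVal a j else 0) := by
  subst hv
  rw [set_map_range]
  apply List.map_congr_left
  intro j hj
  by_cases h : j = k
  · simp [h]
  · have hlt : (j < k + 1) = (j < k) := by
      apply propext; constructor <;> intro <;> omega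
    simp [h, hlt]

theorem nsStep_spec (a : List Int) (k : Nat) (hk : k < a.length) :
    nsStep a ((List.range a.length).map (fun j => if j < k then nsVal a j else 0)) (k : Int)
      = (List.range a.length).map (fun j => if j < k + 1 then nsVal a j else 0) := by
  set f : Nat → Int := fun j => if j < k then nsVal a j else 0 with hf
  have hget : PySem.List.pyGetD ((List.range a.length).map f) (k : Int) 0 = 0 := by
    rw [PySem.List.pyGetD_natCast, PySem.List.getD_map_range f _ k 0 hk]
    simp [hf]
  simp only [nsStep]
  by_cases h1 : (1:Nat) ≤ k <;> by_cases h2 : k + 1 < a.length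
  · rw [if_pos (show (0:Int) ≤ (k:Int) - 1 by omega),
      if_pos (show (k:Int) + 1 < (a.length:Int) by omega), hget,
      show ((k:Int) - 1) = ((k - 1 : Nat) : Int) by omega,
      show ((k:Int) + 1) = ((k + 1 : Nat) : Int) by omega]
    simp only [PySem.List.pySetD_natCast, PySem.List.pyGetD_natCast,
      List.getD_eq_getElem?_getD]
    rw [List.getElem?_set_self (by simpa using hk)]
    simp only [Option.getD_some]
    rw [List.getElem?_set_self (by simpa using hk)]
    simp only [Option.getD_some, List.set_set]
    exact step_final a k _ (by simp [nsVal, h1, h2]; try ring)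
  · rw [if_pos (show (0:Int) ≤ (k:Int) - 1 by omega),
      if_neg (show ¬((k:Int) + 1 < (a.length:Int)) by omega), hget,
      show ((k:Int) - 1) = ((k - 1 : Nat) : Int) by omega]
    simp only [PySem.List.pySetD_natCast, PySem.List.pyGetD_natCast,
      List.getD_eq_getElem?_getD]
    rw [List.getElem?_set_self (by simpa using hk)]
    simp only [Option.getD_some, List.set_set]
    exact step_final a k _ (by simp [nsVal, h1, h2]; try ring)
  · rw [if_neg (show ¬((0:Int) ≤ (k:Int) - 1) by omega),
      if_pos (show (k:Int) + 1 < (a.length:Int) by omega), hget,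
      show ((k:Int) + 1) = ((k + 1 : Nat) : Int) by omega]
    simp only [PySem.List.pySetD_natCast, PySem.List.pyGetD_natCast,
      List.getD_eq_getElem?_getD]
    rw [List.getElem?_set_self (by simpa using hk)]
    simp only [Option.getD_some, List.set_set]
    exact step_final a k _ (by simp [nsVal, h1, h2]; try ring)
  · rw [if_neg (show ¬((0:Int) ≤ (k:Int) - 1) by omega),
      if_neg (show ¬((k:Int) + 1 < (a.length:Int)) by omega), hget]
    simp only [PySem.List.pySetD_natCast, PySem.List.pyGetD_natCast]
    exact step_final a k _ (by simp [nsVal, h1, h2]; try ring)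

theorem nsLoop_spec (a : List Int) (k : Nat) (hk : k ≤ a.length) :
    (PySem.List.pyRange 0 (k : Int) 1).foldl (nsStep a)
        ((List.range a.length).map (fun j => if j < 0 then nsVal a j else 0))
      = (List.range a.length).map (fun j => if j < k then nsVal a j else 0) := by
  induction k with
  | zero => simp
  | succ k ih =>
      have h0 : (0 : Int) ≤ (k : Int) := by positivity
      have hcast : ((k : Int) + 1) = ((k + 1 : Nat) : Int) := by push_cast; ring
      rw [← hcast, PySem.List.pyRange_one_succ_right h0, List.foldl_append, ih (by omega)]
      simpa using nsStep_spec a k (by omega)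

theorem A_eq_map (a : List Int) :
    neighbor_sum a = (List.range a.length).map (nsVal a) := by
  simp only [neighbor_sum]
  have hz : ((PySem.List.pyRange 0 (a.length : Int) 1).map (fun _ => (0 : Int)))
      = (List.range a.length).map (fun j => if j < 0 then nsVal a j else 0) := by
    simp [PySem.List.pyRange_one, Function.comp_def, List.map_const']
  rw [hz, nsLoop_spec a a.length le_rfl]
  apply List.map_congr_left
  intro j hj
  simp only [List.mem_range] at hj
  simp [hj]

theorem B_eq_map (a : List Int) :
    neighbor_sum_alt a = (List.range a.length).map (nsVal a) := by
  unfold neighbor_sum_alt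
  simp only [PySem.List.slice_to_neg_one, PySem.List.slice_from_one]
  apply List.ext_getElem
  · simp; omega
  · intro j h1 h2
    simp only [List.getElem_map, List.getElem_zip, List.getElem_range]
    have hj : j < a.length := by simpa using h2
    rw [nsVal]
    match j with
    | 0 =>
      simp only [List.getElem_cons_zero]
      by_cases hlast : 1 < a.length
      · rw [List.getElem_append_left (by simp; omega), List.getElem_tail]
        simp [hlast, List.getD_eq_getElem?_getD, List.getElem?_eq_getElem hj]
        ring
      · have h1a : a.length = 1 := by omega
        rw [List.getElem_append_right (by simp; omega)]
        simp [h1a, List.getD_eq_getElem?_getD]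
    | j' + 1 =>
      rw [List.getElem_cons_succ, List.getElem_dropLast]
      by_cases hlast : j' + 2 < a.length
      · rw [List.getElem_append_left (by simp; omega), List.getElem_tail]
        simp [hj, hlast, List.getD_eq_getElem?_getD,
          List.getElem?_eq_getElem (show j' < a.length by omega)]
        ring
      · rw [List.getElem_append_right (by simp; omega)]
        simp [hj, hlast, List.getD_eq_getElem?_getD,
          List.getElem?_eq_getElem (show j' < a.length by omega)]

-- ===== VERDICT (by name: the statement is the Claim_ definition above) =====
theorem neighbor_sum_spec : Claim_equal_neighbor_sum := by
  intro a _
  unfold Spec_neighbor_sum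
  rw [A_eq_map, B_eq_map]
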